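-- pv_equiv track=rewrite | github.com/pypi-data/pypi-mirror-370 | packages/duosubs/duosubs-1.1.0-py3-none-any.whl/duosubs/core/merger.py | _get_filter_list
-- ===== SOURCE A (Python) =====
-- def _get_filter_list(sequence_filter_list: list[int]) -> list[tuple[int,int]]:
--     """
--     Generates a list of filter spans from a sequence list.
--
--     Args:
--         sequence_filter_list (list[int]): Sequence of indices.
--
--     Returns:
--         list[tuple[int, int]]: List of (start, end) index spans.
--     """
--     filter_list = []
--     for idx, _ in enumerate(sequence_filter_list):
--         sublist = sequence_filter_list[:idx+1]
--         start = min(sublist)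
--         end = max(sublist)+1
--         filter_list.append((start, end))
--     return filter_list
-- ===== SOURCE B (Python) =====
-- def _get_filter_list(sequence_filter_list: list[int]) -> list[tuple[int, int]]:
--     """Single pass keeping running min/max instead of re-scanning each prefix."""
--     if not sequence_filter_list:
--         return []
--     it = iter(sequence_filter_list)
--     lo = hi = next(it)
--     result = [(lo, hi + 1)]
--     for x in it:
--         lo = min(lo, x)
--         hi = max(hi, x)
--         result.append((lo, hi + 1))
--     return result
-- ===== Notes on version B (the rewrite author's own statement) =====
-- stated objective: faster
-- what changed: Replaced the per-index prefix slice with min()/max() re-scans by a single pass that maintains running min and max accumulators.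
import Mathlib
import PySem

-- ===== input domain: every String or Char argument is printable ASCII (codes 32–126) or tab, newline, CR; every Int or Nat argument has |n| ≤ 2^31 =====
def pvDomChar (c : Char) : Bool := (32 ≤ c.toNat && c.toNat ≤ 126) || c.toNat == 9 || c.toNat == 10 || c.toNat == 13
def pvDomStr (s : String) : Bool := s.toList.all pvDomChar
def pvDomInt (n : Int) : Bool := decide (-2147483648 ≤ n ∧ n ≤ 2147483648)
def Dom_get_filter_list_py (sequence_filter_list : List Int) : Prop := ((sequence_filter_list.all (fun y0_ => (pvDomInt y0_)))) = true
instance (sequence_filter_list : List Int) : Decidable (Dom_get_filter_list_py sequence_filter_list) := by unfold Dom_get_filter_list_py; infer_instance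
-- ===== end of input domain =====

-- B replaces A's per-index prefix slice with min()/max() re-scans by one pass with running min/max accumulators (objective: faster).

-- ===== PORT A =====
-- for idx, _ in enumerate(...): sublist = xs[:idx+1]; filter_list.append((min(sublist), max(sublist)+1)).
-- min/max on the nonempty prefix never raise; '.getD 0' is never reached (the prefix has length idx+1 ≥ 1).
def get_filter_list_py (sequence_filter_list : List Int) : List (Int × Int) :=
  (PySem.List.enumerate sequence_filter_list).foldl
    (fun filter_list p =>
      let sublist := PySem.List.slice sequence_filter_list none (some (p.1 + 1))
      let start := (PySem.List.min? sublist (fun y => y)).getD 0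
      let «end» := (PySem.List.max? sublist (fun y => y)).getD 0 + 1
      filter_list ++ [(start, «end»)]) []

-- ===== PORT B =====
-- the 'for x in it' loop of Source B, carrying the running (lo, hi)
def get_filter_list_py_alt_go (lo hi : Int) : List Int → List (Int × Int)
  | [] => []
  | x :: rest =>
      let lo' := min lo x
      let hi' := max hi x
      (lo', hi' + 1) :: get_filter_list_py_alt_go lo' hi' rest

def get_filter_list_py_alt (sequence_filter_list : List Int) : List (Int × Int) :=
  match sequence_filter_list with
  | [] => []
  | x :: rest => (x, x + 1) :: get_filter_list_py_alt_go x x rest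

-- ===== PRECONDITION & SPEC =====
def Spec_get_filter_list_py (sequence_filter_list : List Int) (out : List (Int × Int)) : Prop := out = get_filter_list_py_alt sequence_filter_list
instance (sequence_filter_list : List Int) (out : List (Int × Int)) : Decidable (Spec_get_filter_list_py sequence_filter_list out) := by unfold Spec_get_filter_list_py; infer_instance

-- ===== CLAIM (what is proved, stated in full; the proofs are below) =====
def Claim_equal_get_filter_list_py : Prop := ∀ (sequence_filter_list : List Int), Dom_get_filter_list_py sequence_filter_list → Spec_get_filter_list_py sequence_filter_list (get_filter_list_py sequence_filter_list)

-- ===== LEMMAS AND PROOFS =====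

-- canonical form both programs reduce to
def pvCanon : List Int → List (Int × Int)
  | [] => []
  | y :: t => (List.range (t.length + 1)).map
      (fun k => ((t.take k).foldl min y, (t.take k).foldl max y + 1))

lemma alt_go_eq (t : List Int) : ∀ (lo hi : Int),
    get_filter_list_py_alt_go lo hi t = (List.range t.length).map
      (fun k => ((t.take (k + 1)).foldl min lo, (t.take (k + 1)).foldl max hi + 1)) := by
  induction t with
  | nil => intro lo hi; rfl
  | cons x rest ih =>
      intro lo hi
      simp only [get_filter_list_py_alt_go, List.length_cons, List.range_succ_eq_map,
        List.map_cons, List.map_map, ih]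
      constructor

lemma alt_eq_canon (xs : List Int) : get_filter_list_py_alt xs = pvCanon xs := by
  cases xs with
  | nil => rfl
  | cons y t =>
      simp only [get_filter_list_py_alt, pvCanon, alt_go_eq, List.range_succ_eq_map,
        List.map_cons, List.map_map]
      constructor

lemma a_eq_canon (xs : List Int) : get_filter_list_py xs = pvCanon xs := by
  unfold get_filter_list_py
  rw [PySem.List.foldl_append_singleton_eq_map, List.nil_append]
  cases xs with
  | nil => rfl
  | cons y t =>
      apply List.ext_getElem
      · simp [PySem.List.length_enumerate, pvCanon]
      intro k h1 h2
      simp only [List.getElem_map, PySem.List.getElem_enumerate, pvCanon, List.getElem_range]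
      have hk : ((0:Int) + (k:Int)) + 1 = ((k + 1 : Nat) : Int) := by push_cast; ring
      rw [hk, PySem.List.slice_to_natCast]
      simp [List.take_succ_cons, PySem.List.min?_id_cons, PySem.List.max?_id_cons]

-- ===== VERDICT (by name: the statement is the Claim_ definition above) =====
theorem get_filter_list_py_spec : Claim_equal_get_filter_list_py := by
  intro xs _
  unfold Spec_get_filter_list_py
  rw [a_eq_canon, alt_eq_canon]
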